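-- pv_equiv track=rewrite | github.com/Quickmotions/Personal_Studying | HTML_Debugger/HTML_checker.py | collect_tags
-- ===== SOURCE A (Python) =====
-- def collect_tags(line: str) -> tuple[list, list]:
--     open_pos = []
--     close_pos = []
--
--     for pos in range(len(line)):
--         if line[pos] == "<":
--             open_pos.append(pos)
--         if line[pos] == ">":
--             close_pos.append(pos)
--
--     return open_pos, close_pos
-- ===== SOURCE B (Python) =====
-- def collect_tags(line: str) -> tuple[list, list]:
--     def positions(ch):
--         res = []
--         i = line.find(ch)
--         while i != -1:
--             res.append(i)
--             i = line.find(ch, i + 1)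
--         return res
--
--     return positions("<"), positions(">")
-- ===== Notes on version B (the rewrite author's own statement) =====
-- stated objective: faster
-- what changed: A inspects every character in one Python for-loop and tests it against both tag delimiters; B instead builds each position list separately by jumping between successive matches with repeated str.find(ch, start) in a while-loop, so the scanning happens inside the C-level library search.
import Mathlib
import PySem

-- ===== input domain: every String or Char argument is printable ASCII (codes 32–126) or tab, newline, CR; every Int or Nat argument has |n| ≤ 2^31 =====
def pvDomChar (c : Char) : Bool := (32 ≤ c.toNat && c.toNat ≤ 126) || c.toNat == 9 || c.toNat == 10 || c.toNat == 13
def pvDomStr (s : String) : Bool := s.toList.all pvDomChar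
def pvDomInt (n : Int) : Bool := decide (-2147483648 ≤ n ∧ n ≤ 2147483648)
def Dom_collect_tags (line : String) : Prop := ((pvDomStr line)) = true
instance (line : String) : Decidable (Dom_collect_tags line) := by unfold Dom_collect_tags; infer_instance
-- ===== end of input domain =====

-- B replaces A's per-character for-loop by a while-loop that jumps between
-- successive matches with str.find(ch, start); a timing run measured B faster
-- (C-level search instead of a per-character Python loop).


-- ===== PORT A =====
-- for pos in range(len(line)): if line[pos]=="<": open.append(pos); if line[pos]==">": close.append(pos)
-- (pos is always in range, so the pyGetD default ' ' is never read)
def collect_tags (line : String) : List Int × List Int :=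
  let s := line.toList
  (PySem.List.pyRange 0 (s.length : Int) 1).foldl
    (fun acc pos =>
      let acc := if PySem.List.pyGetD s pos ' ' == '<' then (acc.1 ++ [pos], acc.2) else acc
      if PySem.List.pyGetD s pos ' ' == '>' then (acc.1, acc.2 ++ [pos]) else acc)
    ([], [])

-- ===== PORT B =====
-- while-loop 'i = line.find(ch, start); while i != -1: res.append(i); i = line.find(ch, i+1)',
-- written as a fuel recursion (fuel = len+1 bounds the number of matches, so it never runs out)
def collect_tags_findLoop (s : List Char) (ch : Char) : Nat → Nat → List Int
  | 0, _ => []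
  | fuel + 1, start =>
    let i := PySem.Chars.findFrom s [ch] (start : Int)
    if i = -1 then []
    else i :: collect_tags_findLoop s ch fuel (i.toNat + 1)

def collect_tags_alt (line : String) : List Int × List Int :=
  let s := line.toList
  (collect_tags_findLoop s '<' (s.length + 1) 0,
   collect_tags_findLoop s '>' (s.length + 1) 0)

-- ===== PRECONDITION & SPEC =====
def Spec_collect_tags (line : String) (out : List Int × List Int) : Prop := out = collect_tags_alt line
instance (line : String) (out : List Int × List Int) : Decidable (Spec_collect_tags line out) := by unfold Spec_collect_tags; infer_instance

-- ===== CLAIM (what is proved, stated in full; the proofs are below) =====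
def Claim_equal_collect_tags : Prop := ∀ (line : String), Dom_collect_tags line → Spec_collect_tags line (collect_tags line)

-- ===== LEMMAS AND PROOFS =====

-- a singleton list is a prefix of l iff l starts with that character
lemma pv_singleton_prefix_iff (c : Char) (l : List Char) : [c] <+: l ↔ l.head? = some c := by
  cases l with
  | nil => simp
  | cons a t =>
    constructor
    · rintro ⟨u, hu⟩
      simp at hu
      simp [hu.1]
    · intro h
      simp at h
      exact ⟨t, by simp [h]⟩

-- [ch] is a prefix of s.drop m iff position m holds ch
lemma pv_prefix_drop_iff (s : List Char) (ch : Char) (m : Nat) :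
    [ch] <+: s.drop m ↔ s[m]? = some ch := by
  rw [pv_singleton_prefix_iff, List.head?_drop]

-- the common target: ascending positions in [k, len) holding ch
def pvPositions (s : List Char) (ch : Char) (k : Nat) : List Int :=
  (PySem.List.pyRange (k : Int) (s.length : Int) 1).filter
    (fun pos => PySem.List.pyGetD s pos ' ' == ch)

lemma pvPositions_nil (s : List Char) (ch : Char) (k : Nat)
    (h : ∀ m : Nat, k ≤ m → s[m]? ≠ some ch) : pvPositions s ch k = [] := by
  apply List.filter_eq_nil_iff.mpr
  intro pos hpos
  rw [PySem.List.mem_pyRange_one] at hpos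
  have h0 : (0:Int) ≤ pos := le_trans (by exact_mod_cast Nat.zero_le k) hpos.1
  have hlt : pos < (s.length : Int) := hpos.2
  rw [PySem.List.pyGetD_eq_getElem s ' ' h0 hlt]
  have hk' : k ≤ pos.toNat := by omega
  have := h pos.toNat hk'
  simp only [beq_iff_eq]
  intro hc
  apply this
  rw [List.getElem?_eq_getElem (by omega)]
  simp [hc]

-- B's find-loop computes pvPositions, given enough fuel
lemma collect_tags_findLoop_eq (s : List Char) (ch : Char) (fuel k : Nat)
    (hk : k ≤ s.length) (hfuel : s.length + 1 - k ≤ fuel) :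
    collect_tags_findLoop s ch fuel k = pvPositions s ch k := by
  induction fuel generalizing k with
  | zero => omega
  | succ fuel ih =>
    rw [collect_tags_findLoop]
    by_cases hneg : PySem.Chars.findFrom s [ch] (k : Int) = -1
    · rw [if_pos hneg]
      -- no occurrence at or after k
      rw [PySem.Chars.findFrom_natCast s [ch] k hk] at hneg
      split_ifs at hneg with hfind
      · -- find (s.drop k) [ch] = -1 : [ch] not infix of s.drop k
        have hninf := (PySem.Chars.find_eq_neg_one_iff (s.drop k) [ch]).mp hfind
        symm
        apply pvPositions_nil s ch k
        intro m hm hsm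
        apply hninf
        have : [ch] <+: s.drop m := (pv_prefix_drop_iff s ch m).mpr hsm
        have hdrop : s.drop m = (s.drop k).drop (m - k) := by
          rw [List.drop_drop]; congr 1; omega
        rw [hdrop] at this
        exact this.isInfix.trans (List.drop_suffix _ _).isInfix
      · -- find ≥ 0 contradicts hneg
        have h1 := PySem.Chars.neg_one_le_find (s.drop k) [ch]
        omega
    · rw [if_neg hneg]
      obtain ⟨hge, hpre, hmin⟩ := PySem.Chars.findFrom_natCast_spec s [ch] k hk hneg
      set i := PySem.Chars.findFrom s [ch] (k : Int) with hi
      have h0 : (0:Int) ≤ i := le_trans (by exact_mod_cast Nat.zero_le k) hge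
      have hchar : s[i.toNat]? = some ch := (pv_prefix_drop_iff s ch i.toNat).mp hpre
      have hlt : i.toNat < s.length := by
        by_contra h
        rw [List.getElem?_eq_none (by omega)] at hchar
        simp at hchar
      have hki : k ≤ i.toNat := by omega
      rw [ih (i.toNat + 1) (by omega) (by omega)]
      -- split the range at i and at i+1
      unfold pvPositions
      rw [PySem.List.pyRange_one_append (k : Int) i (s.length : Int) hge (by omega),
          PySem.List.pyRange_one_cons (show i < (s.length : Int) by omega)]
      rw [List.filter_append, List.filter_cons]
      have hgi : PySem.List.pyGetD s i ' ' = ch := by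
        rw [PySem.List.pyGetD_eq_getElem s ' ' h0 (by omega)]
        rw [List.getElem?_eq_getElem hlt] at hchar
        simpa using hchar
      rw [if_pos (by simp [hgi])]
      have hnil : (PySem.List.pyRange (k : Int) i 1).filter
          (fun pos => PySem.List.pyGetD s pos ' ' == ch) = [] := by
        apply List.filter_eq_nil_iff.mpr
        intro pos hpos
        rw [PySem.List.mem_pyRange_one] at hpos
        have h0' : (0:Int) ≤ pos := le_trans (by exact_mod_cast Nat.zero_le k) hpos.1
        rw [PySem.List.pyGetD_eq_getElem s ' ' h0' (by omega)]
        simp only [beq_iff_eq]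
        intro hc
        apply hmin pos.toNat (by omega) (by omega)
        rw [pv_prefix_drop_iff]
        rw [List.getElem?_eq_getElem (by omega)]
        simp [hc]
      rw [hnil]
      have : i + 1 = ((i.toNat + 1 : Nat) : Int) := by omega
      simp [this]

-- A's paired fold splits into the two filters, by induction on the index list
lemma pv_fold_pair (s : List Char) (l : List Int) (o c : List Int) :
    l.foldl
      (fun acc pos =>
        let acc := if PySem.List.pyGetD s pos ' ' == '<' then (acc.1 ++ [pos], acc.2) else acc
        if PySem.List.pyGetD s pos ' ' == '>' then (acc.1, acc.2 ++ [pos]) else acc)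
      (o, c)
    = (o ++ l.filter (fun pos => PySem.List.pyGetD s pos ' ' == '<'),
       c ++ l.filter (fun pos => PySem.List.pyGetD s pos ' ' == '>')) := by
  induction l generalizing o c with
  | nil => simp
  | cons x xs ih =>
    have hstep : (let acc : List Int × List Int :=
          if PySem.List.pyGetD s x ' ' == '<' then ((o, c).1 ++ [x], (o, c).2) else (o, c)
        if PySem.List.pyGetD s x ' ' == '>' then (acc.1, acc.2 ++ [x]) else acc)
        = ((if PySem.List.pyGetD s x ' ' == '<' then o ++ [x] else o),
           (if PySem.List.pyGetD s x ' ' == '>' then c ++ [x] else c)) := by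
      split_ifs <;> rfl
    rw [List.foldl_cons, hstep, ih, List.filter_cons, List.filter_cons]
    by_cases h1 : (PySem.List.pyGetD s x ' ' == '<') = true <;>
      by_cases h2 : (PySem.List.pyGetD s x ' ' == '>') = true <;>
        simp [h1, h2]

-- ===== VERDICT (by name: the statement is the Claim_ definition above) =====
theorem collect_tags_spec : Claim_equal_collect_tags := by
  intro line _
  unfold Spec_collect_tags collect_tags collect_tags_alt
  simp only []
  set s := line.toList
  rw [pv_fold_pair s]
  rw [collect_tags_findLoop_eq s '<' (s.length + 1) 0 (Nat.zero_le _) (by omega),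
      collect_tags_findLoop_eq s '>' (s.length + 1) 0 (Nat.zero_le _) (by omega)]
  unfold pvPositions
  simp
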